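-- pv_equiv track=rewrite | github.com/Seungjun-bob/prgms_study | Level1/lv1_모의고사/solution.py | solution
-- ===== SOURCE A (Python) =====
-- def solution(answers):
--
--     a = [1,2,3,4,5]
--     b = [2,1,2,3,2,4,2,5]
--     c = [3,3,1,1,2,2,4,4,5,5]
--     a_score = 0
--     b_score = 0
--     c_score = 0
--     score = []
--     answer = []
--     for i in range(len(answers)):
--         if a[i%len(a)] == answers[i]:
--             a_score +=1
--         if b[i%len(b)] == answers[i]:
--             b_score +=1
--         if c[i%len(c)] == answers[i]:
--             c_score +=1
--     score.append(a_score)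
--     score.append(b_score)
--     score.append(c_score)
--     maxscore = max(score)
--
--     for i in range(3):
--         if score[i] == maxscore:
--             answer.append(i+1)
--     return answer
-- ===== SOURCE B (Python) =====
-- def solution(answers):
--     patterns = [[1, 2, 3, 4, 5],
--                 [2, 1, 2, 3, 2, 4, 2, 5],
--                 [3, 3, 1, 1, 2, 2, 4, 4, 5, 5]]
--     scores = []
--     for p in patterns:
--         s, start = 0, 0
--         while start < len(answers):
--             s += sum(x == y for x, y in zip(p, answers[start:start + len(p)]))
--             start += len(p)
--         scores.append(s)
--     m = max(scores)
--     return [i + 1 for i, s in enumerate(scores) if s == m]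
-- ===== Notes on version B (the rewrite author's own statement) =====
-- stated objective: alternative
-- what changed: B scores each pattern by walking over the answers one pattern-length chunk at a time, zipping the pattern against each chunk (no index arithmetic, no modular indexing), instead of A's single indexed loop that tests all three patterns at i % len(p); selection of the max indices is a comprehension over enumerate(scores).
import Mathlib
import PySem

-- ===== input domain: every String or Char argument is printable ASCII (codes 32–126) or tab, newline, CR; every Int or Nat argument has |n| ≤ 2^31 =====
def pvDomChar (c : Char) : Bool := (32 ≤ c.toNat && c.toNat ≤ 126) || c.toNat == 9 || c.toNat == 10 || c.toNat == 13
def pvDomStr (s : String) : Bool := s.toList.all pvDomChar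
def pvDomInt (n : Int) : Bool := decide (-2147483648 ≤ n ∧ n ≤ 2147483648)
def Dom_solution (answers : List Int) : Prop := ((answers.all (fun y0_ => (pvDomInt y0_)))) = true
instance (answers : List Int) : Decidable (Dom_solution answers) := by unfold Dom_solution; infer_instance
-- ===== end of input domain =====

-- B scores each pattern by walking over the answers one pattern-length chunk at a
-- time and zipping the pattern against each chunk (no per-element index arithmetic),
-- instead of A's single indexed loop testing all three patterns at i % len(p);
-- objective: an alternative traversal of the same cost.

-- ===== PORT A =====
-- the three pattern constants of A
def pvPatA : List Int := [1, 2, 3, 4, 5]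
def pvPatB : List Int := [2, 1, 2, 3, 2, 4, 2, 5]
def pvPatC : List Int := [3, 3, 1, 1, 2, 2, 4, 4, 5, 5]

-- A's single loop "for i in range(len(answers))" as structural recursion over answers
-- carrying the index i and the three counters; a[i%len(a)] with i ≥ 0 is exactly
-- List.getD at the Nat index i % len (index always in range).
def solutionLoop : Nat → List Int → Int → Int → Int → (Int × Int × Int)
  | _, [], sa, sb, sc => (sa, sb, sc)
  | i, x :: xs, sa, sb, sc =>
      solutionLoop (i + 1) xs
        (if pvPatA.getD (i % pvPatA.length) 0 = x then sa + 1 else sa)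
        (if pvPatB.getD (i % pvPatB.length) 0 = x then sb + 1 else sb)
        (if pvPatC.getD (i % pvPatC.length) 0 = x then sc + 1 else sc)

def solution (answers : List Int) : List Int :=
  let st := solutionLoop 0 answers 0 0 0
  let score := [st.1, st.2.1, st.2.2]
  -- max(score): score has three elements, so max? is never none
  let maxscore := (PySem.List.max? score (fun y => y)).getD 0
  (PySem.List.pyRange 0 3 1).foldl
    (fun answer i => if PySem.List.pyGetD score i 0 = maxscore then answer ++ [i + 1] else answer) []

-- ===== PORT B =====
-- sum(x == y for x, y in zip(p, answers[start:start+len(p)]))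
def zipCount (p xs : List Int) : Int :=
  ((p.zip xs).countP (fun q => q.1 == q.2) : Int)

-- the "while start < len(answers)" loop of B: accumulate the zip count of the chunk
-- answers[start:start+len(p)], then advance start by len(p); 'max … 1' only makes
-- the recursion total — every pattern B passes is nonempty, where it is len(p).
def chunkLoop (p : List Int) (answers : List Int) : Int → Nat → Int
  | s, st =>
    if st < answers.length then
      chunkLoop p answers
        (s + zipCount p (PySem.List.slice answers (some (st : Int)) (some ((st : Int) + (p.length : Int)))))
        (st + max p.length 1)
    else s
termination_by _ st => answers.length - st
decreasing_by have := Nat.le_max_right p.length 1; omega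

def solution_alt (answers : List Int) : List Int :=
  let patterns : List (List Int) :=
    [[1, 2, 3, 4, 5], [2, 1, 2, 3, 2, 4, 2, 5], [3, 3, 1, 1, 2, 2, 4, 4, 5, 5]]
  let scores := patterns.foldl (fun sc p => sc ++ [chunkLoop p answers 0 0]) []
  -- max(scores): scores has three elements, so max? is never none
  let m := (PySem.List.max? scores (fun y => y)).getD 0
  (PySem.List.enumerate scores).filterMap (fun q => if q.2 = m then some (q.1 + 1) else none)

-- ===== PRECONDITION & SPEC =====
def Spec_solution (answers : List Int) (out : List Int) : Prop := out = solution_alt answers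
instance (answers : List Int) (out : List Int) : Decidable (Spec_solution answers out) := by unfold Spec_solution; infer_instance

-- ===== CLAIM (what is proved, stated in full; the proofs are below) =====
def Claim_equal_solution : Prop := ∀ (answers : List Int), Dom_solution answers → Spec_solution answers (solution answers)

-- ===== LEMMAS AND PROOFS =====

-- reference count: matches of pattern p against xs starting at offset i
def cntAux (p : List Int) : Nat → List Int → Int
  | _, [] => 0
  | i, x :: xs => (if p.getD (i % p.length) 0 = x then 1 else 0) + cntAux p (i + 1) xs

theorem solutionLoop_eq (xs : List Int) : ∀ (i : Nat) (sa sb sc : Int),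
    solutionLoop i xs sa sb sc =
      (sa + cntAux pvPatA i xs, sb + cntAux pvPatB i xs, sc + cntAux pvPatC i xs) := by
  induction xs with
  | nil => intro i sa sb sc; simp [solutionLoop, cntAux]
  | cons x xs ih =>
      intro i sa sb sc
      simp only [solutionLoop, cntAux, ih]
      split_ifs <;> simp only [Prod.mk.injEq] <;> refine ⟨by ring, by ring, by ring⟩

-- periodicity: cntAux only reads the index modulo the pattern length
theorem cnt_period (p : List Int) (xs : List Int) : ∀ (i : Nat),
    cntAux p (i + p.length) xs = cntAux p i xs := by
  induction xs with
  | nil => intro i; simp [cntAux]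
  | cons x xs ih =>
      intro i
      have h : (i + p.length) % p.length = i % p.length := Nat.add_mod_right i p.length
      simp only [cntAux, h]
      have := ih (i + 1)
      rw [show i + p.length + 1 = i + 1 + p.length by omega, this]

-- one block: counting from offset j < len p is the zip of the pattern tail
-- against xs plus the count of the rest starting at a fresh block
theorem cnt_block (p : List Int) (xs : List Int) : ∀ (j : Nat), j < p.length →
    cntAux p j xs = zipCount (p.drop j) xs + cntAux p 0 (xs.drop (p.length - j)) := by
  induction xs with
  | nil => intro j hj; simp [cntAux, zipCount]
  | cons x xs ih =>
      intro j hj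
      have hdp : p.drop j = p[j] :: p.drop (j + 1) := List.drop_eq_getElem_cons hj
      have hgd : p.getD (j % p.length) 0 = p[j] := by
        rw [Nat.mod_eq_of_lt hj, List.getD_eq_getElem _ _ hj]
      have hdx : (x :: xs).drop (p.length - j) = xs.drop (p.length - j - 1) := by
        rw [show p.length - j = (p.length - j - 1) + 1 by omega]; rfl
      simp only [cntAux, hgd, hdx, hdp, zipCount, List.zip_cons_cons, List.countP_cons]
      push_cast
      by_cases hc : j + 1 < p.length
      · rw [ih (j + 1) hc, show p.length - (j + 1) = p.length - j - 1 by omega]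
        simp only [beq_iff_eq]
        split_ifs with h1 <;> simp_all [zipCount] <;> ring
      · have hj1 : j + 1 = p.length := by omega
        have hd1 : p.drop (j + 1) = [] := by rw [hj1]; simp
        have hc1 : cntAux p (j + 1) xs = cntAux p 0 xs := by
          rw [hj1, show p.length = 0 + p.length by omega, cnt_period]
        have : p.length - j - 1 = 0 := by omega
        simp only [hc1, hd1, List.zip_nil_left, List.countP_nil, this, List.drop_zero,
          beq_iff_eq]
        split_ifs with h1 <;> simp_all [zipCount]

theorem zip_take_len (p : List Int) : ∀ (ys : List Int), p.zip (ys.take p.length) = p.zip ys := by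
  induction p with
  | nil => intro ys; simp
  | cons a p ih => intro ys; cases ys <;> simp [ih]

theorem chunkLoop_eq (p : List Int) (hp : p ≠ []) (answers : List Int) :
    ∀ (st : Nat) (s : Int), chunkLoop p answers s st = s + cntAux p 0 (answers.drop st) := by
  have hL : 0 < p.length := List.length_pos_of_ne_nil hp
  have hmax : max p.length 1 = p.length := by omega
  suffices H : ∀ (n st : Nat), answers.length - st ≤ n → ∀ (s : Int),
      chunkLoop p answers s st = s + cntAux p 0 (answers.drop st) from
    fun st s => H (answers.length - st) st le_rfl s
  intro n
  induction n with
  | zero =>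
      intro st h s
      have hge : answers.length ≤ st := by omega
      rw [chunkLoop, if_neg (by omega), List.drop_eq_nil_of_le hge]
      simp [cntAux]
  | succ n ih =>
      intro st h s
      by_cases hlt : st < answers.length
      · have hslice : PySem.List.slice answers (some (st : Int)) (some ((st : Int) + (p.length : Int)))
            = (answers.drop st).take p.length := PySem.List.slice_natCast_add answers st p.length
        have hz : zipCount p ((answers.drop st).take p.length) = zipCount p (answers.drop st) := by
          unfold zipCount; rw [zip_take_len]
        have hdd : answers.drop (st + p.length) = (answers.drop st).drop p.length := by
          rw [List.drop_drop, Nat.add_comm]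
        rw [chunkLoop, if_pos hlt, hmax, hslice, hz, ih (st + p.length) (by omega),
          cnt_block p (answers.drop st) 0 hL, hdd]
        simp only [List.drop_zero, Nat.sub_zero]
        ring
      · have hge : answers.length ≤ st := by omega
        rw [chunkLoop, if_neg (by omega), List.drop_eq_nil_of_le hge]
        simp [cntAux]

-- the common tail: picking the indices achieving the maximum of three scores
theorem tail_eq (sa sb sc : Int) :
    (PySem.List.pyRange 0 3 1).foldl
      (fun answer i => if PySem.List.pyGetD [sa, sb, sc] i 0 =
          (PySem.List.max? [sa, sb, sc] (fun y => y)).getD 0 then answer ++ [i + 1] else answer) []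
    = (PySem.List.enumerate [sa, sb, sc]).filterMap
        (fun q => if q.2 = (PySem.List.max? [sa, sb, sc] (fun y => y)).getD 0
                  then some (q.1 + 1) else none) := by
  have hr : PySem.List.pyRange 0 3 1 = [0, 1, 2] := by decide
  have he : PySem.List.enumerate [sa, sb, sc] = [(0, sa), (1, sb), (2, sc)] := by
    norm_num [PySem.List.enumerate_cons, PySem.List.enumerate_nil]
  have g0 : PySem.List.pyGetD [sa, sb, sc] 0 0 = sa := rfl
  have g1 : PySem.List.pyGetD [sa, sb, sc] 1 0 = sb := rfl
  have g2 : PySem.List.pyGetD [sa, sb, sc] 2 0 = sc := rfl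
  rw [hr, he]
  simp only [List.foldl, List.filterMap_cons, List.filterMap_nil, g0, g1, g2]
  split_ifs <;> simp

theorem solution_eq_alt (answers : List Int) : solution answers = solution_alt answers := by
  unfold solution solution_alt
  rw [solutionLoop_eq]
  simp only [List.foldl, List.nil_append, List.singleton_append,
    show ([1, 2, 3, 4, 5] : List Int) = pvPatA from rfl,
    show ([2, 1, 2, 3, 2, 4, 2, 5] : List Int) = pvPatB from rfl,
    show ([3, 3, 1, 1, 2, 2, 4, 4, 5, 5] : List Int) = pvPatC from rfl,
    chunkLoop_eq pvPatA (by decide) answers 0, chunkLoop_eq pvPatB (by decide) answers 0,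
    chunkLoop_eq pvPatC (by decide) answers 0, List.drop_zero, zero_add]
  exact tail_eq _ _ _

-- ===== VERDICT (by name: the statement is the Claim_ definition above) =====
theorem solution_spec : Claim_equal_solution := by
  intro answers _
  exact solution_eq_alt answers
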